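-- pv_equiv track=rewrite | github.com/KingReaper6940/Veswo---Bot | backend/utils/essay_writer.py | _formal_tone
-- ===== SOURCE A (Python) =====
-- def _formal_tone(text: str) -> str:
--     """
--     Apply formal tone to text.
--     """
--     # Replace casual phrases with formal ones
--     replacements = {
--         "let's": "let us",
--         "don't": "do not",
--         "can't": "cannot",
--         "won't": "will not",
--         "it's": "it is",
--         "that's": "that is"
--     }
--
--     for casual, formal in replacements.items():
--         text = text.replace(casual, formal)
--
--     return text
-- ===== SOURCE B (Python) =====
-- def _formal_tone(text: str) -> str:
--     """
--     Apply formal tone to text: single left-to-right scan replacing the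
--     casual forms, instead of six independent full-text replace passes.
--     """
--     table = [
--         ("let's", "let us"),
--         ("don't", "do not"),
--         ("can't", "cannot"),
--         ("won't", "will not"),
--         ("it's", "it is"),
--         ("that's", "that is"),
--     ]
--     out = []
--     i = 0
--     n = len(text)
--     while i < n:
--         for casual, formal in table:
--             if text.startswith(casual, i):
--                 out.append(formal)
--                 i += len(casual)
--                 break
--         else:
--             out.append(text[i])
--             i += 1
--     return "".join(out)
-- ===== Notes on version B (the rewrite author's own statement) =====
-- stated objective: alternative
-- what changed: B makes a single left-to-right scan over the text, emitting the formal replacement at each match position, instead of A's six independent full-text str.replace passes.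
-- intended difference: On texts containing don'that's, can'that's or won'that's, A's later that's-pass re-matches across the substituted output (e.g. A turns don'that's into "do nothat is") while B replaces only the occurrences present in the original text (giving "do nothat's"); not re-processing replacement output is the intended behaviour. — e.g. on _formal_tone("don'that's"): A returns "do nothat is", B returns "do nothat's"
import Mathlib
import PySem

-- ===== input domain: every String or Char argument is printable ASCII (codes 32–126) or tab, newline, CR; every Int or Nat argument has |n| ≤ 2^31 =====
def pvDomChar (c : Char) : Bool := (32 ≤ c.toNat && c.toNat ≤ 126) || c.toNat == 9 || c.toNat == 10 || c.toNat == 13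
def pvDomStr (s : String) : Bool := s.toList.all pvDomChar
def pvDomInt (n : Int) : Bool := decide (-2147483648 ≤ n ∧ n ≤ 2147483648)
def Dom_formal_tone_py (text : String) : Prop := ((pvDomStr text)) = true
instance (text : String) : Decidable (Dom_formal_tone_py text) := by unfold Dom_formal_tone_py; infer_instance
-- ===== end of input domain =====

-- B replaces A's six sequential full-text str.replace passes by one left-to-right scan over
-- the text (objective: alternative); on the three overlap strings named in D_ the scan
-- intentionally does not re-match across already substituted output (see D_ below).

-- ===== PORT A =====
def formal_tone_py (text : String) : String :=
  let replacements : List (String × String) :=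
    [("let's", "let us"), ("don't", "do not"), ("can't", "cannot"),
     ("won't", "will not"), ("it's", "it is"), ("that's", "that is")]
  replacements.foldl (fun t kv => PySem.Str.replace t kv.1 kv.2) text

-- ===== PORT B =====
-- single left-to-right scan: at each position try the casual forms in table order;
-- on a match emit the formal form and jump past the match, else emit the character
def altGo : List Char → List Char
  | [] => []
  | c :: t =>
    if "let's".toList.isPrefixOf (c :: t) then "let us".toList ++ altGo ((c :: t).drop 5)
    else if "don't".toList.isPrefixOf (c :: t) then "do not".toList ++ altGo ((c :: t).drop 5)
    else if "can't".toList.isPrefixOf (c :: t) then "cannot".toList ++ altGo ((c :: t).drop 5)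
    else if "won't".toList.isPrefixOf (c :: t) then "will not".toList ++ altGo ((c :: t).drop 5)
    else if "it's".toList.isPrefixOf (c :: t) then "it is".toList ++ altGo ((c :: t).drop 4)
    else if "that's".toList.isPrefixOf (c :: t) then "that is".toList ++ altGo ((c :: t).drop 6)
    else c :: altGo t
termination_by l => l.length
decreasing_by all_goals simp

def formal_tone_py_alt (text : String) : String :=
  String.ofList (altGo text.toList)

-- ===== PRECONDITION & SPEC =====
-- On texts containing don'that's, can'that's or won'that's, A's later that's-pass
-- re-matches across the substituted output (A "don'that's" = "do nothat is") while B
-- replaces only occurrences present in the original text (B "don'that's" = "do nothat's");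
-- not re-processing replacement output is the intended behaviour.
def D_formal_tone_py (text : String) : Prop :=
  PySem.Str.isIn "don'that's" text = true ∨ PySem.Str.isIn "can'that's" text = true ∨
    PySem.Str.isIn "won'that's" text = true
instance (text : String) : Decidable (D_formal_tone_py text) := by
  unfold D_formal_tone_py; infer_instance

def Spec_formal_tone_py (text : String) (out : String) : Prop :=
  ¬ D_formal_tone_py text → out = formal_tone_py_alt text
instance (text : String) (out : String) : Decidable (Spec_formal_tone_py text out) := by
  unfold Spec_formal_tone_py; infer_instance

def pvDiffWitness_formal_tone_py : String := "don'that's"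
def pvDiffWitnessOut_formal_tone_py : String × String := ("do nothat is", "do nothat's")

-- ===== CLAIM (what is proved, stated in full; the proofs are below) =====
def Claim_unchanged_formal_tone_py : Prop :=
  ∀ (text : String), Dom_formal_tone_py text → Spec_formal_tone_py text (formal_tone_py text)
def Claim_changed_formal_tone_py : Prop :=
  Dom_formal_tone_py (pvDiffWitness_formal_tone_py) ∧
    D_formal_tone_py (pvDiffWitness_formal_tone_py) ∧
    formal_tone_py (pvDiffWitness_formal_tone_py) = pvDiffWitnessOut_formal_tone_py.1 ∧
    formal_tone_py_alt (pvDiffWitness_formal_tone_py) = pvDiffWitnessOut_formal_tone_py.2 ∧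
    pvDiffWitnessOut_formal_tone_py.1 ≠ pvDiffWitnessOut_formal_tone_py.2
def Claim_exact_formal_tone_py : Prop :=
  ∀ (text : String), Dom_formal_tone_py text → D_formal_tone_py text →
    formal_tone_py text ≠ formal_tone_py_alt text

-- ===== LEMMAS AND PROOFS =====

-- proof-side model of one full-text replace pass (= CPython str.replace, old ≠ "")
def rep (old new : List Char) : List Char → List Char
  | [] => []
  | c :: t =>
    if h : old ≠ [] ∧ old <+: (c :: t) then
      new ++ rep old new ((c :: t).drop old.length)
    else
      c :: rep old new t
termination_by l => l.length
decreasing_by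
  · have : 0 < old.length := List.length_pos_iff.mpr h.1
    simp; omega
  · simp

-- the replacement table, on lists of chars
def T : List (List Char × List Char) :=
  [("let's".toList, "let us".toList), ("don't".toList, "do not".toList),
   ("can't".toList, "cannot".toList), ("won't".toList, "will not".toList),
   ("it's".toList, "it is".toList), ("that's".toList, "that is".toList)]

def compL (L : List (List Char × List Char)) (s : List Char) : List Char :=
  L.foldl (fun s kv => rep kv.1 kv.2 s) s

-- all nonempty suffixes of the casual forms
def WS : List (List Char) :=
  ["let's", "et's", "t's", "'s", "s", "don't", "on't", "n't", "'t", "t",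
   "can't", "an't", "won't", "it's", "that's", "hat's", "at's"].map String.toList

def kHats : List Char := "hat's".toList

def BadL (cs : List Char) : Prop :=
  "don'that's".toList <:+: cs ∨ "can'that's".toList <:+: cs ∨ "won'that's".toList <:+: cs

lemma BadL_mono {s' s : List Char} (h : s' <:+: s) : BadL s' → BadL s := by
  rintro (h1 | h1 | h1)
  · exact Or.inl (h1.trans h)
  · exact Or.inr (Or.inl (h1.trans h))
  · exact Or.inr (Or.inr (h1.trans h))

-- ---- generic list facts ----
lemma pv_prefix_append (a b c : List Char) (h : a <+: b ++ c) :
    a <+: b ∨ (b <+: a ∧ a.drop b.length <+: c) := by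
  by_cases hl : a.length ≤ b.length
  · exact Or.inl (List.prefix_of_prefix_length_le h (b.prefix_append c) hl)
  · right
    have hb : b <+: a :=
      List.prefix_of_prefix_length_le (b.prefix_append c) h (by omega)
    obtain ⟨d, rfl⟩ := hb
    refine ⟨List.prefix_append b d, ?_⟩
    rw [List.drop_left]
    exact (List.prefix_append_right_inj b).mp h

lemma pv_prefix_getElem? {w u : List Char} {i : Nat} {a : Char}
    (h : w <+: u) (h2 : w[i]? = some a) : u[i]? = some a := by
  obtain ⟨t, rfl⟩ := h
  have hi : i < w.length := by
    by_contra hc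
    rw [List.getElem?_eq_none (by omega)] at h2
    simp at h2
  rw [List.getElem?_append_left hi]
  exact h2

-- ---- decidable facts about the literal table ----
lemma DF_ws_ne : ∀ w ∈ WS, w ≠ [] := by decide
lemma DF_ws_tail : ∀ w ∈ WS, w.tail = [] ∨ w.tail ∈ WS := by decide
lemma DF_ws_apos : ∀ w ∈ WS, 2 ≤ w.length → w[w.length - 2]? = some '\'' := by decide
lemma DF_ws_len : ∀ w ∈ WS, ∀ kv ∈ T, w.length - 2 < kv.2.length := by decide
lemma DF_v_noapos : ∀ kv ∈ T, '\'' ∉ kv.2 := by decide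
lemma DF_v_ne : ∀ kv ∈ T, kv.2 ≠ [] := by decide
lemma DF_head : ∀ kv ∈ T, kv.1.head? = kv.2.head? := by decide
lemma DF_k_ne : ∀ kv ∈ T, kv.1 ≠ [] := by decide
lemma DF_k_tail : ∀ kv ∈ T, kv.1.tail ∈ WS ∧ kv.1.tail ≠ [] := by decide
lemma DF_no_key_prefix : ∀ kv ∈ T, ∀ kv' ∈ T, kv.1 <+: kv'.1 → kv.1 = kv'.1 := by decide
lemma DF_last : ∀ kv ∈ T, kv.2.getLast? = some 't' → kv.1.getLast? = some 't' := by decide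
lemma DF_hats_ws : kHats ∈ WS := by decide
lemma DFk : ∀ kv ∈ T, ∀ kv' ∈ T, ∀ p < kv.1.length, 0 < p →
    (¬ kv'.1 <+: kv.1.drop p) ∧
      (kv.1.drop p <+: kv'.1 →
        kv'.1.drop (kv.1.length - p) = kHats ∧ kv.1.getLast? = some 't') := by decide
lemma DFv : ∀ kv ∈ T, ∀ kv' ∈ T, ∀ p < kv.2.length,
    (¬ kv'.1 <+: kv.2.drop p) ∧
      (kv.2.drop p <+: kv'.1 →
        kv'.1.drop (kv.2.length - p) = kHats ∧ kv.2.getLast? = some 't') := by decide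

-- ---- PySem.Chars.replace coincides with rep for a nonempty pattern ----
lemma go_eq (old new : List Char) (h : old ≠ []) :
    ∀ fuel (l acc : List Char), l.length ≤ fuel →
      PySem.Chars.replace.go old new fuel l acc = acc.reverse ++ rep old new l := by
  intro fuel
  induction fuel with
  | zero =>
    intro l acc hl
    have : l = [] := by cases l <;> simp_all
    subst this
    simp [PySem.Chars.replace.go, rep]
  | succ n ih =>
    intro l acc hl
    cases l with
    | nil => simp [PySem.Chars.replace.go, rep]
    | cons c t =>
      simp only [PySem.Chars.replace.go]
      by_cases hp : old.isPrefixOf (c :: t)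
      · rw [if_pos hp]
        have hol : 0 < old.length := List.length_pos_iff.mpr h
        rw [ih _ _ (by simp at hl ⊢; omega)]
        have hrep : rep old new (c :: t) = new ++ rep old new ((c :: t).drop old.length) := by
          simp only [rep]
          rw [dif_pos ⟨h, List.isPrefixOf_iff_prefix.mp hp⟩]
        rw [hrep]
        simp
      · rw [if_neg hp]
        rw [ih t (c :: acc) (by simp at hl ⊢; omega)]
        have hrep : rep old new (c :: t) = c :: rep old new t := by
          simp only [rep]
          rw [dif_neg (by rintro ⟨-, hpre⟩; exact hp (List.isPrefixOf_iff_prefix.mpr hpre))]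
        rw [hrep]
        simp

lemma replace_eq_rep (s old new : List Char) (h : old ≠ []) :
    PySem.Chars.replace s old new = rep old new s := by
  unfold PySem.Chars.replace
  rw [if_neg (by simpa [List.isEmpty_iff] using h)]
  rw [go_eq old new h s.length s [] le_rfl]
  simp

-- ---- lifting: a nonempty key suffix prefixing a pass output prefixes its input ----
lemma pv_lift (kv : List Char × List Char) (hT : kv ∈ T) :
    ∀ n (s w : List Char), s.length ≤ n → w ∈ WS → w <+: rep kv.1 kv.2 s → w <+: s := by
  intro n
  induction n with
  | zero =>
    intro s w hs hws hpre
    have : s = [] := by cases s <;> simp_all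
    subst this
    simp only [rep] at hpre
    exact absurd (List.prefix_nil.mp hpre) (DF_ws_ne w hws)
  | succ n ih =>
    intro s w hs hws hpre
    cases s with
    | nil =>
      simp only [rep] at hpre
      exact absurd (List.prefix_nil.mp hpre) (DF_ws_ne w hws)
    | cons c t =>
      simp only [rep] at hpre
      split at hpre
      case isTrue h =>
        -- w <+: kv.2 ++ …; derive that w starts like the key, or a contradiction
        cases w with
        | nil => exact absurd rfl (DF_ws_ne [] hws)
        | cons a w' =>
          by_cases hw' : w' = []
          · subst hw'
            obtain ⟨v0, v', hv2⟩ : ∃ v0 v', kv.2 = v0 :: v' := by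
              cases hx : kv.2 with
              | nil => exact absurd hx (DF_v_ne kv hT)
              | cons v0 v' => exact ⟨v0, v', rfl⟩
            obtain ⟨b, k', hbk⟩ : ∃ b k', kv.1 = b :: k' := by
              cases hx : kv.1 with
              | nil => exact absurd hx (DF_k_ne kv hT)
              | cons b k' => exact ⟨b, k', rfl⟩
            have hva : v0 = a := by
              have h0 := pv_prefix_getElem? hpre (show [a][0]? = some a by simp)
              rw [hv2] at h0
              simpa using h0
            have hbv : b = v0 := by
              have := DF_head kv hT
              rw [hv2, hbk] at this
              simpa using this
            have hbc : b = c := by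
              have := h.2
              rw [hbk, List.cons_prefix_cons] at this
              exact this.1
            have hac : a = c := by rw [← hva, ← hbv, hbc]
            subst hac
            exact List.cons_prefix_cons.mpr ⟨rfl, List.nil_prefix⟩
          · have hlen : 2 ≤ (a :: w').length := by
              have := List.length_pos_iff.mpr hw'
              simp; omega
            have hap := DF_ws_apos _ hws hlen
            have h1 := pv_prefix_getElem? hpre hap
            rw [List.getElem?_append_left (DF_ws_len _ hws kv hT)] at h1
            have : '\'' ∈ kv.2 := List.mem_of_getElem? h1
            exact absurd this (DF_v_noapos kv hT)
      case isFalse h =>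
        cases w with
        | nil => exact absurd rfl (DF_ws_ne [] hws)
        | cons a w' =>
          rw [List.cons_prefix_cons] at hpre
          obtain ⟨rfl, hw⟩ := hpre
          by_cases hw0 : w' = []
          · subst hw0
            exact List.cons_prefix_cons.mpr ⟨rfl, List.nil_prefix⟩
          · have hws' : w' ∈ WS := by
              rcases DF_ws_tail _ hws with h1 | h1
              · simp at h1; exact absurd h1 hw0
              · simpa using h1
            have : w' <+: t := ih t w' (by simp at hs; omega) hws' hw
            exact List.cons_prefix_cons.mpr ⟨rfl, this⟩

lemma pv_liftL : ∀ L, (∀ kv ∈ L, kv ∈ T) →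
    ∀ (s w : List Char), w ∈ WS → w <+: compL L s → w <+: s := by
  intro L
  induction L with
  | nil => intro _ s w _ hpre; exact hpre
  | cons kv L' ih =>
    intro hL s w hws hpre
    have h1 : w <+: rep kv.1 kv.2 s :=
      ih (fun kv' hm => hL kv' (List.mem_cons_of_mem _ hm)) _ w hws hpre
    exact pv_lift kv (hL kv (List.mem_cons_self ..)) s.length s w le_rfl hws h1

-- ---- a pass distributes over a block no occurrence enters ----
lemma pv_split (kv : List Char × List Char) :
    ∀ x y, (∀ p, p < x.length → ¬ kv.1 <+: x.drop p ++ y) →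
      rep kv.1 kv.2 (x ++ y) = x ++ rep kv.1 kv.2 y := by
  intro x
  induction x with
  | nil => intro y _; simp
  | cons c x' ih =>
    intro y h
    have hnot : ¬ kv.1 <+: (c :: x') ++ y := by
      have := h 0 (by simp)
      simpa using this
    show rep kv.1 kv.2 (c :: (x' ++ y)) = _
    simp only [rep]
    rw [dif_neg (by rintro ⟨-, hp⟩; exact hnot (by simpa using hp))]
    rw [ih y (fun p hp => by have := h (p + 1) (by simp; omega); simpa using this)]
    simp

lemma pv_keyblock (k v : List Char) (hkv : (k, v) ∈ T) :
    ∀ L, (∀ kv' ∈ L, kv' ∈ T ∧ kv'.1 ≠ k) →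
      ∀ Z, (k.getLast? = some 't' → ¬ kHats <+: Z) →
        compL L (k ++ Z) = k ++ compL L Z := by
  intro L
  induction L with
  | nil => intro _ Z _; rfl
  | cons kv' L' ih =>
    intro hL Z hg
    obtain ⟨hT', hne⟩ := hL kv' (List.mem_cons_self ..)
    have hsp : rep kv'.1 kv'.2 (k ++ Z) = k ++ rep kv'.1 kv'.2 Z := by
      apply pv_split kv'
      intro p hp hpre
      rcases pv_prefix_append _ _ _ hpre with hc | ⟨hc, hd⟩
      · rcases Nat.eq_zero_or_pos p with rfl | hpos
        · rw [List.drop_zero] at hc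
          exact hne (DF_no_key_prefix kv' hT' (k, v) hkv hc)
        · exact (DFk (k, v) hkv kv' hT' p hp hpos).1 hc
      · rcases Nat.eq_zero_or_pos p with rfl | hpos
        · rw [List.drop_zero] at hc
          exact hne (DF_no_key_prefix (k, v) hkv kv' hT' hc).symm
        · have h2 := (DFk (k, v) hkv kv' hT' p hp hpos).2 hc
          rw [List.length_drop, h2.1] at hd
          exact hg h2.2 hd
    calc compL (kv' :: L') (k ++ Z)
        = compL L' (rep kv'.1 kv'.2 (k ++ Z)) := rfl
      _ = compL L' (k ++ rep kv'.1 kv'.2 Z) := by rw [hsp]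
      _ = k ++ compL L' (rep kv'.1 kv'.2 Z) :=
          ih (fun kv'' hm => hL kv'' (List.mem_cons_of_mem _ hm)) _
            (fun hlast hh =>
              hg hlast (pv_lift kv' hT' Z.length Z kHats le_rfl DF_hats_ws hh))
      _ = k ++ compL (kv' :: L') Z := rfl

lemma pv_valblock (k v : List Char) (hkv : (k, v) ∈ T) :
    ∀ L, (∀ kv' ∈ L, kv' ∈ T) →
      ∀ Z, (v.getLast? = some 't' → ¬ kHats <+: Z) →
        compL L (v ++ Z) = v ++ compL L Z := by
  intro L
  induction L with
  | nil => intro _ Z _; rfl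
  | cons kv' L' ih =>
    intro hL Z hg
    have hT' := hL kv' (List.mem_cons_self ..)
    have hsp : rep kv'.1 kv'.2 (v ++ Z) = v ++ rep kv'.1 kv'.2 Z := by
      apply pv_split kv'
      intro p hp hpre
      rcases pv_prefix_append _ _ _ hpre with hc | ⟨hc, hd⟩
      · exact (DFv (k, v) hkv kv' hT' p hp).1 hc
      · have h2 := (DFv (k, v) hkv kv' hT' p hp).2 hc
        rw [List.length_drop, h2.1] at hd
        exact hg h2.2 hd
    calc compL (kv' :: L') (v ++ Z)
        = compL L' (rep kv'.1 kv'.2 (v ++ Z)) := rfl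
      _ = compL L' (v ++ rep kv'.1 kv'.2 Z) := by rw [hsp]
      _ = v ++ compL L' (rep kv'.1 kv'.2 Z) :=
          ih (fun kv'' hm => hL kv'' (List.mem_cons_of_mem _ hm)) _
            (fun hlast hh =>
              hg hlast (pv_lift kv' hT' Z.length Z kHats le_rfl DF_hats_ws hh))
      _ = v ++ compL (kv' :: L') Z := rfl

lemma rep_head (k v Z : List Char) (h : k ≠ []) :
    rep k v (k ++ Z) = v ++ rep k v Z := by
  cases k with
  | nil => exact absurd rfl h
  | cons c k' =>
    show rep (c :: k') v (c :: (k' ++ Z)) = _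
    simp only [rep]
    rw [dif_pos ⟨h, List.cons_prefix_cons.mpr ⟨rfl, List.prefix_append k' Z⟩⟩]
    congr 1
    have : (c :: (k' ++ Z)).drop (c :: k').length = Z := by
      simp
    rw [this]

lemma compL_append (L1 L2 : List (List Char × List Char)) (s : List Char) :
    compL (L1 ++ L2) s = compL L2 (compL L1 s) := List.foldl_append ..

lemma compL_nil_input : ∀ L, compL L [] = [] := by
  intro L
  induction L with
  | nil => rfl
  | cons kv L' ih =>
    show compL L' (rep kv.1 kv.2 []) = []
    simp only [rep]
    exact ih

lemma comp_match (k v : List Char) (pre post : List (List Char × List Char))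
    (hsplit : T = pre ++ (k, v) :: post)
    (hpre : ∀ kv' ∈ pre, kv' ∈ T ∧ kv'.1 ≠ k)
    (hpost : ∀ kv' ∈ post, kv' ∈ T)
    (rest : List Char)
    (hg : k.getLast? = some 't' → ¬ kHats <+: rest) :
    compL T (k ++ rest) = v ++ compL T rest := by
  have hkv : (k, v) ∈ T := by
    rw [hsplit]; exact List.mem_append_right _ (List.mem_cons_self ..)
  have hkne : k ≠ [] := DF_k_ne _ hkv
  have hZp : k.getLast? = some 't' → ¬ kHats <+: compL pre rest := fun hl hh =>
    hg hl (pv_liftL pre (fun kv' h' => (hpre kv' h').1) rest kHats DF_hats_ws hh)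
  calc compL T (k ++ rest)
      = compL ((k, v) :: post) (compL pre (k ++ rest)) := by rw [hsplit, compL_append]
    _ = compL ((k, v) :: post) (k ++ compL pre rest) := by
        rw [pv_keyblock k v hkv pre hpre rest hg]
    _ = compL post (rep k v (k ++ compL pre rest)) := rfl
    _ = compL post (v ++ rep k v (compL pre rest)) := by rw [rep_head _ _ _ hkne]
    _ = v ++ compL post (rep k v (compL pre rest)) :=
        pv_valblock k v hkv post hpost _
          (fun hvl hh =>
            hZp (DF_last _ hkv hvl)
              (pv_lift (k, v) hkv _ _ _ le_rfl DF_hats_ws hh))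
    _ = v ++ compL T rest := by rw [hsplit, compL_append]; rfl

lemma comp_cons : ∀ L, (∀ kv ∈ L, kv ∈ T) → ∀ (c : Char) (t : List Char),
    (∀ kv ∈ L, ¬ kv.1 <+: c :: t) → compL L (c :: t) = c :: compL L t := by
  intro L
  induction L with
  | nil => intros; rfl
  | cons kv L' ih =>
    intro hL c t h
    have hmem := hL kv (List.mem_cons_self ..)
    have h1 : rep kv.1 kv.2 (c :: t) = c :: rep kv.1 kv.2 t := by
      simp only [rep]
      rw [dif_neg (by rintro ⟨-, hp⟩; exact h kv (List.mem_cons_self ..) hp)]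
    have h2 : ∀ kv' ∈ L', ¬ kv'.1 <+: c :: rep kv.1 kv.2 t := by
      intro kv' hm hp
      have hT' := hL kv' (List.mem_cons_of_mem _ hm)
      obtain ⟨b, w', hbk⟩ : ∃ b w', kv'.1 = b :: w' := by
        cases hx : kv'.1 with
        | nil => exact absurd hx (DF_k_ne kv' hT')
        | cons b w' => exact ⟨b, w', rfl⟩
      rw [hbk, List.cons_prefix_cons] at hp
      obtain ⟨rfl, hw⟩ := hp
      have hwtail := DF_k_tail kv' hT'
      rw [hbk] at hwtail
      simp only [List.tail_cons] at hwtail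
      have hwt : w' <+: t := pv_lift kv hmem t.length t w' le_rfl hwtail.1 hw
      exact h kv' (List.mem_cons_of_mem _ hm)
        (by rw [hbk]; exact List.cons_prefix_cons.mpr ⟨rfl, hwt⟩)
    calc compL (kv :: L') (c :: t)
        = compL L' (rep kv.1 kv.2 (c :: t)) := rfl
      _ = compL L' (c :: rep kv.1 kv.2 t) := by rw [h1]
      _ = c :: compL L' (rep kv.1 kv.2 t) :=
          ih (fun kv' hm => hL kv' (List.mem_cons_of_mem _ hm)) c _ h2
      _ = c :: compL (kv :: L') t := rfl

lemma main_eq : ∀ n (s : List Char), s.length ≤ n → ¬ BadL s → compL T s = altGo s := by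
  intro n
  induction n with
  | zero =>
    intro s hs _
    have : s = [] := by cases s <;> simp_all
    subst this
    rw [compL_nil_input]
    simp [altGo]
  | succ n ih =>
    intro s hs hbad
    cases s with
    | nil => rw [compL_nil_input]; simp [altGo]
    | cons c t =>
      have hsuf : ∀ (k rest : List Char), k ++ rest = c :: t → ¬ BadL rest :=
        fun k rest hk hb => hbad (BadL_mono (List.IsSuffix.isInfix ⟨k, hk⟩) hb)
      have hlen : ∀ (k rest : List Char), k ++ rest = c :: t → k ≠ [] → rest.length ≤ n := by
        intro k rest hk hkne
        have := congrArg List.length hk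
        have hkp := List.length_pos_iff.mpr hkne
        simp at this hs
        omega
      by_cases h1 : "let's".toList <+: c :: t
      · obtain ⟨rest, hrest⟩ := h1
        have hA : altGo (c :: t) = "let us".toList ++ altGo rest := by
          simp only [altGo]
          rw [if_pos (List.isPrefixOf_iff_prefix.mpr ⟨rest, hrest⟩)]
          congr 1
          rw [← hrest]
          rfl
        have hC : compL T (c :: t) = "let us".toList ++ compL T rest := by
          rw [← hrest]
          exact comp_match "let's".toList "let us".toList []
            [("don't".toList, "do not".toList), ("can't".toList, "cannot".toList),
             ("won't".toList, "will not".toList), ("it's".toList, "it is".toList),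
             ("that's".toList, "that is".toList)] rfl (by decide) (by decide) rest
            (fun habs => absurd habs (by decide))
        rw [hA, hC, ih rest (hlen _ _ hrest (by decide)) (hsuf _ _ hrest)]
      by_cases h2 : "don't".toList <+: c :: t
      · obtain ⟨rest, hrest⟩ := h2
        have hA : altGo (c :: t) = "do not".toList ++ altGo rest := by
          simp only [altGo]
          rw [if_neg (by simpa [List.isPrefixOf_iff_prefix] using h1),
            if_pos (List.isPrefixOf_iff_prefix.mpr ⟨rest, hrest⟩)]
          congr 1
          rw [← hrest]
          rfl
        have hg : "don't".toList.getLast? = some 't' → ¬ kHats <+: rest := by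
          intro _ hh
          obtain ⟨e, he⟩ := hh
          apply hbad
          refine Or.inl (List.IsPrefix.isInfix ⟨e, ?_⟩)
          rw [← hrest, ← he,
            show "don'that's".toList = "don't".toList ++ kHats from by decide,
            List.append_assoc]
        have hC : compL T (c :: t) = "do not".toList ++ compL T rest := by
          rw [← hrest]
          exact comp_match "don't".toList "do not".toList
            [("let's".toList, "let us".toList)]
            [("can't".toList, "cannot".toList),
             ("won't".toList, "will not".toList), ("it's".toList, "it is".toList),
             ("that's".toList, "that is".toList)] rfl (by decide) (by decide) rest hg
        rw [hA, hC, ih rest (hlen _ _ hrest (by decide)) (hsuf _ _ hrest)]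
      by_cases h3 : "can't".toList <+: c :: t
      · obtain ⟨rest, hrest⟩ := h3
        have hA : altGo (c :: t) = "cannot".toList ++ altGo rest := by
          simp only [altGo]
          rw [if_neg (by simpa [List.isPrefixOf_iff_prefix] using h1),
            if_neg (by simpa [List.isPrefixOf_iff_prefix] using h2),
            if_pos (List.isPrefixOf_iff_prefix.mpr ⟨rest, hrest⟩)]
          congr 1
          rw [← hrest]
          rfl
        have hg : "can't".toList.getLast? = some 't' → ¬ kHats <+: rest := by
          intro _ hh
          obtain ⟨e, he⟩ := hh
          apply hbad
          refine Or.inr (Or.inl (List.IsPrefix.isInfix ⟨e, ?_⟩))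
          rw [← hrest, ← he,
            show "can'that's".toList = "can't".toList ++ kHats from by decide,
            List.append_assoc]
        have hC : compL T (c :: t) = "cannot".toList ++ compL T rest := by
          rw [← hrest]
          exact comp_match "can't".toList "cannot".toList
            [("let's".toList, "let us".toList), ("don't".toList, "do not".toList)]
            [("won't".toList, "will not".toList), ("it's".toList, "it is".toList),
             ("that's".toList, "that is".toList)] rfl (by decide) (by decide) rest hg
        rw [hA, hC, ih rest (hlen _ _ hrest (by decide)) (hsuf _ _ hrest)]
      by_cases h4 : "won't".toList <+: c :: t
      · obtain ⟨rest, hrest⟩ := h4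
        have hA : altGo (c :: t) = "will not".toList ++ altGo rest := by
          simp only [altGo]
          rw [if_neg (by simpa [List.isPrefixOf_iff_prefix] using h1),
            if_neg (by simpa [List.isPrefixOf_iff_prefix] using h2),
            if_neg (by simpa [List.isPrefixOf_iff_prefix] using h3),
            if_pos (List.isPrefixOf_iff_prefix.mpr ⟨rest, hrest⟩)]
          congr 1
          rw [← hrest]
          rfl
        have hg : "won't".toList.getLast? = some 't' → ¬ kHats <+: rest := by
          intro _ hh
          obtain ⟨e, he⟩ := hh
          apply hbad
          refine Or.inr (Or.inr (List.IsPrefix.isInfix ⟨e, ?_⟩))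
          rw [← hrest, ← he,
            show "won'that's".toList = "won't".toList ++ kHats from by decide,
            List.append_assoc]
        have hC : compL T (c :: t) = "will not".toList ++ compL T rest := by
          rw [← hrest]
          exact comp_match "won't".toList "will not".toList
            [("let's".toList, "let us".toList), ("don't".toList, "do not".toList),
             ("can't".toList, "cannot".toList)]
            [("it's".toList, "it is".toList), ("that's".toList, "that is".toList)]
            rfl (by decide) (by decide) rest hg
        rw [hA, hC, ih rest (hlen _ _ hrest (by decide)) (hsuf _ _ hrest)]
      by_cases h5 : "it's".toList <+: c :: t
      · obtain ⟨rest, hrest⟩ := h5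
        have hA : altGo (c :: t) = "it is".toList ++ altGo rest := by
          simp only [altGo]
          rw [if_neg (by simpa [List.isPrefixOf_iff_prefix] using h1),
            if_neg (by simpa [List.isPrefixOf_iff_prefix] using h2),
            if_neg (by simpa [List.isPrefixOf_iff_prefix] using h3),
            if_neg (by simpa [List.isPrefixOf_iff_prefix] using h4),
            if_pos (List.isPrefixOf_iff_prefix.mpr ⟨rest, hrest⟩)]
          congr 1
          rw [← hrest]
          rfl
        have hC : compL T (c :: t) = "it is".toList ++ compL T rest := by
          rw [← hrest]
          exact comp_match "it's".toList "it is".toList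
            [("let's".toList, "let us".toList), ("don't".toList, "do not".toList),
             ("can't".toList, "cannot".toList), ("won't".toList, "will not".toList)]
            [("that's".toList, "that is".toList)] rfl (by decide) (by decide) rest
            (fun habs => absurd habs (by decide))
        rw [hA, hC, ih rest (hlen _ _ hrest (by decide)) (hsuf _ _ hrest)]
      by_cases h6 : "that's".toList <+: c :: t
      · obtain ⟨rest, hrest⟩ := h6
        have hA : altGo (c :: t) = "that is".toList ++ altGo rest := by
          simp only [altGo]
          rw [if_neg (by simpa [List.isPrefixOf_iff_prefix] using h1),
            if_neg (by simpa [List.isPrefixOf_iff_prefix] using h2),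
            if_neg (by simpa [List.isPrefixOf_iff_prefix] using h3),
            if_neg (by simpa [List.isPrefixOf_iff_prefix] using h4),
            if_neg (by simpa [List.isPrefixOf_iff_prefix] using h5),
            if_pos (List.isPrefixOf_iff_prefix.mpr ⟨rest, hrest⟩)]
          congr 1
          rw [← hrest]
          rfl
        have hC : compL T (c :: t) = "that is".toList ++ compL T rest := by
          rw [← hrest]
          exact comp_match "that's".toList "that is".toList
            [("let's".toList, "let us".toList), ("don't".toList, "do not".toList),
             ("can't".toList, "cannot".toList), ("won't".toList, "will not".toList),
             ("it's".toList, "it is".toList)] [] rfl (by decide) (by decide) rest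
            (fun habs => absurd habs (by decide))
        rw [hA, hC, ih rest (hlen _ _ hrest (by decide)) (hsuf _ _ hrest)]
      · have hall : ∀ kv ∈ T, ¬ kv.1 <+: c :: t := by
          intro kv hm
          fin_cases hm
          exacts [h1, h2, h3, h4, h5, h6]
        have hAe : altGo (c :: t) = c :: altGo t := by
          simp only [altGo]
          rw [if_neg (by simpa [List.isPrefixOf_iff_prefix] using h1),
            if_neg (by simpa [List.isPrefixOf_iff_prefix] using h2),
            if_neg (by simpa [List.isPrefixOf_iff_prefix] using h3),
            if_neg (by simpa [List.isPrefixOf_iff_prefix] using h4),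
            if_neg (by simpa [List.isPrefixOf_iff_prefix] using h5),
            if_neg (by simpa [List.isPrefixOf_iff_prefix] using h6)]
        rw [comp_cons T (fun kv h => h) c t hall, hAe,
          ih t (by simp at hs; omega)
            (fun hb => hbad (BadL_mono (List.IsSuffix.isInfix ⟨[c], rfl⟩) hb))]

lemma toList_A (text : String) : (formal_tone_py text).toList = compL T text.toList := by
  simp only [formal_tone_py, List.foldl, PySem.Str.toList_replace]
  rw [replace_eq_rep _ _ _ (by decide), replace_eq_rep _ _ _ (by decide),
    replace_eq_rep _ _ _ (by decide), replace_eq_rep _ _ _ (by decide),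
    replace_eq_rep _ _ _ (by decide), replace_eq_rep _ _ _ (by decide)]
  rfl

-- ---- tightness: inside the change region the two programs always differ ----
lemma pv_split_free (k v b : List Char)
    (hfree : ∀ p < b.length, ¬ k <+: b.drop p ∧ ¬ b.drop p <+: k) :
    ∀ y, rep k v (b ++ y) = b ++ rep k v y := by
  intro y
  exact pv_split (k, v) b y (fun p hp hpre => by
    rcases pv_prefix_append _ _ _ hpre with hc | ⟨hc, _⟩
    · exact (hfree p hp).1 hc
    · exact (hfree p hp).2 hc)

def badsL : List (List Char) :=
  ["don'that's".toList, "can'that's".toList, "won'that's".toList]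

lemma DF_bad_nopref : ∀ bd ∈ badsL, ∀ kv ∈ T, ¬ bd <+: kv.1 := by decide
lemma DF_bad_head : ∀ bd ∈ badsL, ∀ kv ∈ T, kv.1 <+: bd →
    bd.drop kv.1.length = kHats ∧ kv.1.getLast? = some 't' := by decide
lemma DF_bad_mid : ∀ bd ∈ badsL, ∀ kv ∈ T, ∀ p < kv.1.length, 0 < p →
    ¬ bd <+: kv.1.drop p ∧ ¬ kv.1.drop p <+: bd := by decide

lemma bad_in_append_one (kv : List Char × List Char) (hkv : kv ∈ T) (bd : List Char)
    (hbd : bd ∈ badsL) (rest : List Char) (h : bd <:+: kv.1 ++ rest) :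
    (kv.1.getLast? = some 't' ∧ kHats <+: rest) ∨ bd <:+: rest := by
  obtain ⟨u, w, huw⟩ := h
  have h2 : u ++ (bd ++ w) = kv.1 ++ rest := by rw [← List.append_assoc, huw]
  have hdrop : bd <+: (kv.1 ++ rest).drop u.length := by
    rw [← h2, List.drop_left]; exact List.prefix_append bd w
  rcases Nat.lt_or_ge u.length kv.1.length with hp | hp
  · rcases Nat.eq_zero_or_pos u.length with hp0 | hppos
    · rw [hp0, List.drop_zero] at hdrop
      rcases pv_prefix_append _ _ _ hdrop with hc | ⟨hc, hd⟩
      · exact absurd hc (DF_bad_nopref bd hbd kv hkv)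
      · obtain ⟨he1, he2⟩ := DF_bad_head bd hbd kv hkv hc
        rw [he1] at hd
        exact Or.inl ⟨he2, hd⟩
    · rw [List.drop_append_of_le_length (Nat.le_of_lt hp)] at hdrop
      rcases pv_prefix_append _ _ _ hdrop with hc | ⟨hc, _⟩
      · exact absurd hc (DF_bad_mid bd hbd kv hkv u.length hp hppos).1
      · exact absurd hc (DF_bad_mid bd hbd kv hkv u.length hp hppos).2
  · right
    rw [List.drop_append, List.drop_eq_nil_of_le hp, List.nil_append] at hdrop
    exact hdrop.isInfix.trans (List.drop_suffix _ rest).isInfix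

lemma bad_in_append (kv : List Char × List Char) (hkv : kv ∈ T) (rest : List Char)
    (h : BadL (kv.1 ++ rest)) :
    (kv.1.getLast? = some 't' ∧ kHats <+: rest) ∨ BadL rest := by
  rcases h with h | h | h
  · rcases bad_in_append_one kv hkv _ (by decide) rest h with h' | h'
    · exact Or.inl h'
    · exact Or.inr (Or.inl h')
  · rcases bad_in_append_one kv hkv _ (by decide) rest h with h' | h'
    · exact Or.inl h'
    · exact Or.inr (Or.inr (Or.inl h'))
  · rcases bad_in_append_one kv hkv _ (by decide) rest h with h' | h'
    · exact Or.inl h'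
    · exact Or.inr (Or.inr (Or.inr h'))

lemma altGo_hats (e : List Char) : altGo (kHats ++ e) = kHats ++ altGo e := by
  show altGo ('h' :: 'a' :: 't' :: '\'' :: 's' :: e) = 'h' :: 'a' :: 't' :: '\'' :: 's' :: altGo e
  simp [altGo, List.isPrefixOf]

lemma tight_head_don (e : List Char) :
    ∃ X, compL T ("don'that's".toList ++ e) = "do nothat is".toList ++ X := by
  refine ⟨(rep "that's".toList "that is".toList (rep "it's".toList "it is".toList (rep "won't".toList "will not".toList (rep "can't".toList "cannot".toList (rep "don't".toList "do not".toList (rep "let's".toList "let us".toList e)))))), ?_⟩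
  simp only [compL, T, List.foldl]
  rw [pv_split_free "let's".toList "let us".toList "don'that's".toList (by decide) e]
  rw [show "don'that's".toList = "don't".toList ++ kHats from by decide, List.append_assoc]
  rw [rep_head "don't".toList "do not".toList _ (by decide)]
  rw [pv_split_free "don't".toList "do not".toList kHats (by decide)]
  rw [← List.append_assoc, show "do not".toList ++ kHats = "do nothat's".toList from by decide]
  rw [pv_split_free "can't".toList "cannot".toList "do nothat's".toList (by decide)]
  rw [pv_split_free "won't".toList "will not".toList "do nothat's".toList (by decide)]
  rw [pv_split_free "it's".toList "it is".toList "do nothat's".toList (by decide)]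
  rw [show "do nothat's".toList = "do no".toList ++ "that's".toList from by decide,
    List.append_assoc]
  rw [pv_split_free "that's".toList "that is".toList "do no".toList (by decide)]
  rw [rep_head "that's".toList "that is".toList _ (by decide)]
  rw [← List.append_assoc, show "do no".toList ++ "that is".toList = "do nothat is".toList from by decide]

lemma tight_head_can (e : List Char) :
    ∃ X, compL T ("can'that's".toList ++ e) = "cannothat is".toList ++ X := by
  refine ⟨(rep "that's".toList "that is".toList (rep "it's".toList "it is".toList (rep "won't".toList "will not".toList (rep "can't".toList "cannot".toList (rep "don't".toList "do not".toList (rep "let's".toList "let us".toList e)))))), ?_⟩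
  simp only [compL, T, List.foldl]
  rw [pv_split_free "let's".toList "let us".toList "can'that's".toList (by decide) e]
  rw [pv_split_free "don't".toList "do not".toList "can'that's".toList (by decide)]
  rw [show "can'that's".toList = "can't".toList ++ kHats from by decide, List.append_assoc]
  rw [rep_head "can't".toList "cannot".toList _ (by decide)]
  rw [pv_split_free "can't".toList "cannot".toList kHats (by decide)]
  rw [← List.append_assoc, show "cannot".toList ++ kHats = "cannothat's".toList from by decide]
  rw [pv_split_free "won't".toList "will not".toList "cannothat's".toList (by decide)]
  rw [pv_split_free "it's".toList "it is".toList "cannothat's".toList (by decide)]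
  rw [show "cannothat's".toList = "canno".toList ++ "that's".toList from by decide,
    List.append_assoc]
  rw [pv_split_free "that's".toList "that is".toList "canno".toList (by decide)]
  rw [rep_head "that's".toList "that is".toList _ (by decide)]
  rw [← List.append_assoc, show "canno".toList ++ "that is".toList = "cannothat is".toList from by decide]

lemma tight_head_won (e : List Char) :
    ∃ X, compL T ("won'that's".toList ++ e) = "will nothat is".toList ++ X := by
  refine ⟨(rep "that's".toList "that is".toList (rep "it's".toList "it is".toList (rep "won't".toList "will not".toList (rep "can't".toList "cannot".toList (rep "don't".toList "do not".toList (rep "let's".toList "let us".toList e)))))), ?_⟩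
  simp only [compL, T, List.foldl]
  rw [pv_split_free "let's".toList "let us".toList "won'that's".toList (by decide) e]
  rw [pv_split_free "don't".toList "do not".toList "won'that's".toList (by decide)]
  rw [pv_split_free "can't".toList "cannot".toList "won'that's".toList (by decide)]
  rw [show "won'that's".toList = "won't".toList ++ kHats from by decide, List.append_assoc]
  rw [rep_head "won't".toList "will not".toList _ (by decide)]
  rw [pv_split_free "won't".toList "will not".toList kHats (by decide)]
  rw [← List.append_assoc,
    show "will not".toList ++ kHats = "will nothat's".toList from by decide]
  rw [pv_split_free "it's".toList "it is".toList "will nothat's".toList (by decide)]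
  rw [show "will nothat's".toList = "will no".toList ++ "that's".toList from by decide,
    List.append_assoc]
  rw [pv_split_free "that's".toList "that is".toList "will no".toList (by decide)]
  rw [rep_head "that's".toList "that is".toList _ (by decide)]
  rw [← List.append_assoc,
    show "will no".toList ++ "that is".toList = "will nothat is".toList from by decide]

lemma tight_ne : ∀ n (s : List Char), s.length ≤ n → BadL s → compL T s ≠ altGo s := by
  intro n
  induction n with
  | zero =>
    intro s hs hbad _
    have : s = [] := by cases s <;> simp_all
    subst this
    rcases hbad with h | h | h <;> exact absurd (List.infix_nil.mp h) (by decide)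
  | succ n ih =>
    intro s hs hbad
    cases s with
    | nil =>
      rcases hbad with h | h | h <;> exact absurd (List.infix_nil.mp h) (by decide)
    | cons c t =>
      have hlen : ∀ (k rest : List Char), k ++ rest = c :: t → k ≠ [] → rest.length ≤ n := by
        intro k rest hk hkne
        have := congrArg List.length hk
        have hkp := List.length_pos_iff.mpr hkne
        simp at this hs
        omega
      by_cases h1 : "let's".toList <+: c :: t
      · obtain ⟨rest, hrest⟩ := h1
        rcases bad_in_append ("let's".toList, "let us".toList) (by decide) rest
            (by rw [hrest]; exact hbad) with ⟨hl, -⟩ | hbr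
        · exact absurd hl (by decide)
        · have hA : altGo (c :: t) = "let us".toList ++ altGo rest := by
            simp only [altGo]
            rw [if_pos (List.isPrefixOf_iff_prefix.mpr ⟨rest, hrest⟩)]
            congr 1
            rw [← hrest]
            rfl
          have hC : compL T (c :: t) = "let us".toList ++ compL T rest := by
            rw [← hrest]
            exact comp_match "let's".toList "let us".toList []
              [("don't".toList, "do not".toList), ("can't".toList, "cannot".toList),
               ("won't".toList, "will not".toList), ("it's".toList, "it is".toList),
               ("that's".toList, "that is".toList)] rfl (by decide) (by decide) rest
              (fun habs => absurd habs (by decide))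
          intro heq
          rw [hA, hC] at heq
          exact ih rest (hlen _ _ hrest (by decide)) hbr (List.append_cancel_left heq)
      by_cases h2 : "don't".toList <+: c :: t
      · obtain ⟨rest, hrest⟩ := h2
        have hA : altGo (c :: t) = "do not".toList ++ altGo rest := by
          simp only [altGo]
          rw [if_neg (by simpa [List.isPrefixOf_iff_prefix] using h1),
            if_pos (List.isPrefixOf_iff_prefix.mpr ⟨rest, hrest⟩)]
          congr 1
          rw [← hrest]
          rfl
        by_cases hh : kHats <+: rest
        · obtain ⟨e, he⟩ := hh
          have hs2 : c :: t = "don'that's".toList ++ e := by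
            rw [← hrest, ← he,
              show "don'that's".toList = "don't".toList ++ kHats from by decide,
              List.append_assoc]
          have hB2 : altGo (c :: t) = "do nothat's".toList ++ altGo e := by
            rw [hA, ← he, altGo_hats, ← List.append_assoc,
              show "do not".toList ++ kHats = "do nothat's".toList from by decide]
          obtain ⟨X, hX⟩ := tight_head_don e
          intro heq
          rw [hs2] at heq
          rw [hX] at heq
          rw [← hs2, hB2] at heq
          have h9a : ("do nothat is".toList ++ X)[9]? = some ' ' := by
            rw [List.getElem?_append_left (by decide)]
            decide
          have h9b : ("do nothat's".toList ++ altGo e)[9]? = some '\'' := by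
            rw [List.getElem?_append_left (by decide)]
            decide
          rw [heq, h9b] at h9a
          exact absurd h9a (by decide)
        · have hbr : BadL rest := by
            rcases bad_in_append ("don't".toList, "do not".toList) (by decide) rest
                (by rw [hrest]; exact hbad) with ⟨-, hh'⟩ | hbr
            · exact absurd hh' hh
            · exact hbr
          have hC : compL T (c :: t) = "do not".toList ++ compL T rest := by
            rw [← hrest]
            exact comp_match "don't".toList "do not".toList
              [("let's".toList, "let us".toList)]
              [("can't".toList, "cannot".toList),
               ("won't".toList, "will not".toList), ("it's".toList, "it is".toList),
               ("that's".toList, "that is".toList)] rfl (by decide) (by decide) rest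
              (fun _ => hh)
          intro heq
          rw [hA, hC] at heq
          exact ih rest (hlen _ _ hrest (by decide)) hbr (List.append_cancel_left heq)
      by_cases h3 : "can't".toList <+: c :: t
      · obtain ⟨rest, hrest⟩ := h3
        have hA : altGo (c :: t) = "cannot".toList ++ altGo rest := by
          simp only [altGo]
          rw [if_neg (by simpa [List.isPrefixOf_iff_prefix] using h1),
            if_neg (by simpa [List.isPrefixOf_iff_prefix] using h2),
            if_pos (List.isPrefixOf_iff_prefix.mpr ⟨rest, hrest⟩)]
          congr 1
          rw [← hrest]
          rfl
        by_cases hh : kHats <+: rest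
        · obtain ⟨e, he⟩ := hh
          have hs2 : c :: t = "can'that's".toList ++ e := by
            rw [← hrest, ← he,
              show "can'that's".toList = "can't".toList ++ kHats from by decide,
              List.append_assoc]
          have hB2 : altGo (c :: t) = "cannothat's".toList ++ altGo e := by
            rw [hA, ← he, altGo_hats, ← List.append_assoc,
              show "cannot".toList ++ kHats = "cannothat's".toList from by decide]
          obtain ⟨X, hX⟩ := tight_head_can e
          intro heq
          rw [hs2] at heq
          rw [hX] at heq
          rw [← hs2, hB2] at heq
          have h9a : ("cannothat is".toList ++ X)[9]? = some ' ' := by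
            rw [List.getElem?_append_left (by decide)]
            decide
          have h9b : ("cannothat's".toList ++ altGo e)[9]? = some '\'' := by
            rw [List.getElem?_append_left (by decide)]
            decide
          rw [heq, h9b] at h9a
          exact absurd h9a (by decide)
        · have hbr : BadL rest := by
            rcases bad_in_append ("can't".toList, "cannot".toList) (by decide) rest
                (by rw [hrest]; exact hbad) with ⟨-, hh'⟩ | hbr
            · exact absurd hh' hh
            · exact hbr
          have hC : compL T (c :: t) = "cannot".toList ++ compL T rest := by
            rw [← hrest]
            exact comp_match "can't".toList "cannot".toList
              [("let's".toList, "let us".toList), ("don't".toList, "do not".toList)]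
              [("won't".toList, "will not".toList), ("it's".toList, "it is".toList),
               ("that's".toList, "that is".toList)] rfl (by decide) (by decide) rest
              (fun _ => hh)
          intro heq
          rw [hA, hC] at heq
          exact ih rest (hlen _ _ hrest (by decide)) hbr (List.append_cancel_left heq)
      by_cases h4 : "won't".toList <+: c :: t
      · obtain ⟨rest, hrest⟩ := h4
        have hA : altGo (c :: t) = "will not".toList ++ altGo rest := by
          simp only [altGo]
          rw [if_neg (by simpa [List.isPrefixOf_iff_prefix] using h1),
            if_neg (by simpa [List.isPrefixOf_iff_prefix] using h2),
            if_neg (by simpa [List.isPrefixOf_iff_prefix] using h3),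
            if_pos (List.isPrefixOf_iff_prefix.mpr ⟨rest, hrest⟩)]
          congr 1
          rw [← hrest]
          rfl
        by_cases hh : kHats <+: rest
        · obtain ⟨e, he⟩ := hh
          have hs2 : c :: t = "won'that's".toList ++ e := by
            rw [← hrest, ← he,
              show "won'that's".toList = "won't".toList ++ kHats from by decide,
              List.append_assoc]
          have hB2 : altGo (c :: t) = "will nothat's".toList ++ altGo e := by
            rw [hA, ← he, altGo_hats, ← List.append_assoc,
              show "will not".toList ++ kHats = "will nothat's".toList from by decide]
          obtain ⟨X, hX⟩ := tight_head_won e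
          intro heq
          rw [hs2] at heq
          rw [hX] at heq
          rw [← hs2, hB2] at heq
          have h9a : ("will nothat is".toList ++ X)[11]? = some ' ' := by
            rw [List.getElem?_append_left (by decide)]
            decide
          have h9b : ("will nothat's".toList ++ altGo e)[11]? = some '\'' := by
            rw [List.getElem?_append_left (by decide)]
            decide
          rw [heq, h9b] at h9a
          exact absurd h9a (by decide)
        · have hbr : BadL rest := by
            rcases bad_in_append ("won't".toList, "will not".toList) (by decide) rest
                (by rw [hrest]; exact hbad) with ⟨-, hh'⟩ | hbr
            · exact absurd hh' hh
            · exact hbr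
          have hC : compL T (c :: t) = "will not".toList ++ compL T rest := by
            rw [← hrest]
            exact comp_match "won't".toList "will not".toList
              [("let's".toList, "let us".toList), ("don't".toList, "do not".toList),
               ("can't".toList, "cannot".toList)]
              [("it's".toList, "it is".toList), ("that's".toList, "that is".toList)]
              rfl (by decide) (by decide) rest (fun _ => hh)
          intro heq
          rw [hA, hC] at heq
          exact ih rest (hlen _ _ hrest (by decide)) hbr (List.append_cancel_left heq)
      by_cases h5 : "it's".toList <+: c :: t
      · obtain ⟨rest, hrest⟩ := h5
        rcases bad_in_append ("it's".toList, "it is".toList) (by decide) rest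
            (by rw [hrest]; exact hbad) with ⟨hl, -⟩ | hbr
        · exact absurd hl (by decide)
        · have hA : altGo (c :: t) = "it is".toList ++ altGo rest := by
            simp only [altGo]
            rw [if_neg (by simpa [List.isPrefixOf_iff_prefix] using h1),
              if_neg (by simpa [List.isPrefixOf_iff_prefix] using h2),
              if_neg (by simpa [List.isPrefixOf_iff_prefix] using h3),
              if_neg (by simpa [List.isPrefixOf_iff_prefix] using h4),
              if_pos (List.isPrefixOf_iff_prefix.mpr ⟨rest, hrest⟩)]
            congr 1
            rw [← hrest]
            rfl
          have hC : compL T (c :: t) = "it is".toList ++ compL T rest := by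
            rw [← hrest]
            exact comp_match "it's".toList "it is".toList
              [("let's".toList, "let us".toList), ("don't".toList, "do not".toList),
               ("can't".toList, "cannot".toList), ("won't".toList, "will not".toList)]
              [("that's".toList, "that is".toList)] rfl (by decide) (by decide) rest
              (fun habs => absurd habs (by decide))
          intro heq
          rw [hA, hC] at heq
          exact ih rest (hlen _ _ hrest (by decide)) hbr (List.append_cancel_left heq)
      by_cases h6 : "that's".toList <+: c :: t
      · obtain ⟨rest, hrest⟩ := h6
        rcases bad_in_append ("that's".toList, "that is".toList) (by decide) rest
            (by rw [hrest]; exact hbad) with ⟨hl, -⟩ | hbr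
        · exact absurd hl (by decide)
        · have hA : altGo (c :: t) = "that is".toList ++ altGo rest := by
            simp only [altGo]
            rw [if_neg (by simpa [List.isPrefixOf_iff_prefix] using h1),
              if_neg (by simpa [List.isPrefixOf_iff_prefix] using h2),
              if_neg (by simpa [List.isPrefixOf_iff_prefix] using h3),
              if_neg (by simpa [List.isPrefixOf_iff_prefix] using h4),
              if_neg (by simpa [List.isPrefixOf_iff_prefix] using h5),
              if_pos (List.isPrefixOf_iff_prefix.mpr ⟨rest, hrest⟩)]
            congr 1
            rw [← hrest]
            rfl
          have hC : compL T (c :: t) = "that is".toList ++ compL T rest := by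
            rw [← hrest]
            exact comp_match "that's".toList "that is".toList
              [("let's".toList, "let us".toList), ("don't".toList, "do not".toList),
               ("can't".toList, "cannot".toList), ("won't".toList, "will not".toList),
               ("it's".toList, "it is".toList)] [] rfl (by decide) (by decide) rest
              (fun habs => absurd habs (by decide))
          intro heq
          rw [hA, hC] at heq
          exact ih rest (hlen _ _ hrest (by decide)) hbr (List.append_cancel_left heq)
      · have hall : ∀ kv ∈ T, ¬ kv.1 <+: c :: t := by
          intro kv hm
          fin_cases hm
          exacts [h1, h2, h3, h4, h5, h6]
        have hAe : altGo (c :: t) = c :: altGo t := by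
          simp only [altGo]
          rw [if_neg (by simpa [List.isPrefixOf_iff_prefix] using h1),
            if_neg (by simpa [List.isPrefixOf_iff_prefix] using h2),
            if_neg (by simpa [List.isPrefixOf_iff_prefix] using h3),
            if_neg (by simpa [List.isPrefixOf_iff_prefix] using h4),
            if_neg (by simpa [List.isPrefixOf_iff_prefix] using h5),
            if_neg (by simpa [List.isPrefixOf_iff_prefix] using h6)]
        have hbadt : BadL t := by
          rcases hbad with h | h | h
          · rcases List.infix_cons_iff.mp h with hpf | hin
            · exact absurd (List.IsPrefix.trans (by decide) hpf) h2
            · exact Or.inl hin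
          · rcases List.infix_cons_iff.mp h with hpf | hin
            · exact absurd (List.IsPrefix.trans (by decide) hpf) h3
            · exact Or.inr (Or.inl hin)
          · rcases List.infix_cons_iff.mp h with hpf | hin
            · exact absurd (List.IsPrefix.trans (by decide) hpf) h4
            · exact Or.inr (Or.inr hin)
        intro heq
        rw [comp_cons T (fun kv h => h) c t hall, hAe] at heq
        exact ih t (by simp at hs; omega) hbadt (by simpa using heq)

-- ===== VERDICT (by name: the statement is the Claim_ definition above) =====
theorem formal_tone_py_spec : Claim_unchanged_formal_tone_py := by
  intro text _ hD
  have hbad : ¬ BadL text.toList := by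
    intro hb
    apply hD
    rcases hb with h | h | h
    · exact Or.inl ((PySem.Str.isIn_iff_infix _ _).mpr h)
    · exact Or.inr (Or.inl ((PySem.Str.isIn_iff_infix _ _).mpr h))
    · exact Or.inr (Or.inr ((PySem.Str.isIn_iff_infix _ _).mpr h))
  have h1 : (formal_tone_py text).toList = (formal_tone_py_alt text).toList := by
    rw [toList_A, main_eq text.toList.length text.toList le_rfl hbad]
    simp [formal_tone_py_alt]
  exact String.toList_inj.mp h1

theorem formal_tone_py_changed : Claim_changed_formal_tone_py := by
  unfold Claim_changed_formal_tone_py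
  refine ⟨by decide, by decide, by decide, ?_, by decide⟩
  show String.ofList (altGo "don'that's".toList) = "do nothat's"
  simp [altGo]

theorem formal_tone_py_tight : Claim_exact_formal_tone_py := by
  intro text _ hD heq
  have hbadL : BadL text.toList := by
    rcases hD with h | h | h
    · exact Or.inl ((PySem.Str.isIn_iff_infix _ _).mp h)
    · exact Or.inr (Or.inl ((PySem.Str.isIn_iff_infix _ _).mp h))
    · exact Or.inr (Or.inr ((PySem.Str.isIn_iff_infix _ _).mp h))
  have htl : compL T text.toList = altGo text.toList := by
    rw [← toList_A, heq]
    simp [formal_tone_py_alt]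
  exact tight_ne text.toList.length text.toList le_rfl hbadL htl
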